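-- pv_equiv track=rewrite | github.com/m4ll0k/Atlas | tamper/general_chardoubleencode.py | general_chardoubleencode
-- ===== SOURCE A (Python) =====
-- import string
--
-- def general_chardoubleencode(payload):
-- 	# -- generic -- #
-- 	_payload = payload
-- 	if payload:
-- 		_payload = ""
-- 		i = 0
-- 		while i < len(payload):
-- 			if payload[i] == '%' and(i<len(payload) - 2)and payload[i+1:i+2] in string.hexdigits and payload[i+2:i+3] in string.hexdigits:
-- 				_payload += '%%25%s'%payload[i+1:i+3]
-- 				i+=3
-- 			else:
-- 				_payload += '%%25%.2X'%ord(payload[i])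
-- 				i += 1
-- 	return _payload
-- ===== SOURCE B (Python) =====
-- import re
--
-- _TOKEN = re.compile(r'%[0-9a-fA-F]{2}|.', re.DOTALL)
--
-- def _double(m):
--     t = m.group(0)
--     return '%25' + t[1:] if len(t) == 3 else '%%25%.2X' % ord(t)
--
-- def general_chardoubleencode(payload):
--     if not payload:
--         return payload
--     return _TOKEN.sub(_double, payload)
-- ===== Notes on version B (the rewrite author's own statement) =====
-- stated objective: faster
-- what changed: Replaced the hand-written index/while scanner with its repeated string += and slicing by a single compiled-regex substitution pass (re.sub over '%[0-9a-fA-F]{2}|.' with DOTALL) whose leftmost alternation reproduces the jump-3-or-1 tokenization.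
import Mathlib
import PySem

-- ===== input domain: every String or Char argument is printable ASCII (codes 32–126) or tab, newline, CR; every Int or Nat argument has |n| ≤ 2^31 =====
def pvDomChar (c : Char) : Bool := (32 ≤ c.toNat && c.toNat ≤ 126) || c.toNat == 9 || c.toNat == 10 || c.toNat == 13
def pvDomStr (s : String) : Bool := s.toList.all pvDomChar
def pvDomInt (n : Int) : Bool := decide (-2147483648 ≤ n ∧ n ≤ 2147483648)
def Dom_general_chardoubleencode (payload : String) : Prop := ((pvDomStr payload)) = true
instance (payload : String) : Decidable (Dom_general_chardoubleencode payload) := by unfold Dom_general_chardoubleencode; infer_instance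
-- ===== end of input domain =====

-- B replaces A's hand-written index/while scanner by one regex-substitution pass
-- (tokenize by the leftmost alternation '%[0-9a-fA-F]{2}|.' with DOTALL, then replace
-- each token); measured faster on the large generated inputs (A rebuilds its accumulator
-- with string +=).

-- '%.2X' % ord(c): exact for character codes < 256 (all of Dom); both Pythons use this format string.
def pyHexDigitU (n : Nat) : Char := if n < 10 then Char.ofNat (48 + n) else Char.ofNat (55 + n)
def pyHex2 (c : Char) : String := String.ofList [pyHexDigitU (c.toNat / 16), pyHexDigitU (c.toNat % 16)]

-- ===== PORT A =====
-- string.hexdigits; 'payload[i+1:i+2] in string.hexdigits' on a 1-char slice = char membership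
def hexdigitsA : List Char := ['0','1','2','3','4','5','6','7','8','9','a','b','c','d','e','f','A','B','C','D','E','F']

-- the while loop over index i, as recursion on the suffix from i (i advances by 3 past
-- a matched %XX, else by 1).  The guard "payload[i]=='%' and i<len(payload)-2 and both
-- slices hex" is the first pattern ('%' with at least two following characters, since
-- i<len-2 ⇔ i+2 ≤ len-1) plus the two hex-membership tests.
def aLoop : List Char → String
  | [] => ""
  | '%' :: c1 :: c2 :: rest =>
      if hexdigitsA.contains c1 && hexdigitsA.contains c2 then
        "%25" ++ String.ofList [c1, c2] ++ aLoop rest      -- '%%25%s' % payload[i+1:i+3]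
      else
        "%25" ++ pyHex2 '%' ++ aLoop (c1 :: c2 :: rest)    -- '%%25%.2X' % ord('%')
  | c :: rest => "%25" ++ pyHex2 c ++ aLoop rest           -- '%%25%.2X' % ord(payload[i])

def general_chardoubleencode (payload : String) : String :=
  if payload == "" then payload else aLoop payload.toList

-- ===== PORT B =====
-- the regex character class [0-9a-fA-F]
def isHexClassB (c : Char) : Bool :=
  ('0' ≤ c && c ≤ '9') || ('a' ≤ c && c ≤ 'f') || ('A' ≤ c && c ≤ 'F')

-- the match stream of _TOKEN = re.compile(r'%[0-9a-fA-F]{2}|.', re.DOTALL) over payload: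
-- at each position the left alternative '%XX' is tried first, otherwise '.' takes one
-- character (DOTALL: any character, including newline)
def tokensB : List Char → List (List Char)
  | [] => []
  | '%' :: c1 :: c2 :: rest =>
      if isHexClassB c1 && isHexClassB c2 then ['%', c1, c2] :: tokensB rest
      else ['%'] :: tokensB (c1 :: c2 :: rest)
  | c :: rest => [c] :: tokensB rest

-- the replacement function _double: '%25'+t[1:] if len(t)==3 else '%%25%.2X'%ord(t)
def replB (t : List Char) : String :=
  if t.length = 3 then "%25" ++ String.ofList (t.drop 1)
  else "%25" ++ pyHex2 (t.headD ' ')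

-- _TOKEN.sub(_double, payload) = concatenation of the replaced tokens
def general_chardoubleencode_alt (payload : String) : String :=
  if payload == "" then payload
  else String.join ((tokensB payload.toList).map replB)

-- ===== PRECONDITION & SPEC =====
def Spec_general_chardoubleencode (payload : String) (out : String) : Prop := out = general_chardoubleencode_alt payload
instance (payload : String) (out : String) : Decidable (Spec_general_chardoubleencode payload out) := by unfold Spec_general_chardoubleencode; infer_instance

-- ===== CLAIM (what is proved, stated in full; the proofs are below) =====
def Claim_equal_general_chardoubleencode : Prop := ∀ (payload : String), Dom_general_chardoubleencode payload → Spec_general_chardoubleencode payload (general_chardoubleencode payload)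

-- ===== LEMMAS AND PROOFS =====

theorem char_eq_toNat (c d : Char) : (c = d) ↔ (c.toNat = d.toNat) := by
  constructor
  · rintro rfl; rfl
  · intro h
    have hc := Char.ofNat_toNat c
    rw [h, Char.ofNat_toNat d] at hc
    exact hc.symm

theorem char_le_toNat (c d : Char) : (c ≤ d) ↔ (c.toNat ≤ d.toNat) := by
  simp [Char.le_def, UInt32.le_iff_toNat_le]

-- A's hex test (membership in string.hexdigits) coincides with B's regex class
theorem hex_test_eq (c : Char) : hexdigitsA.contains c = isHexClassB c := by
  rw [hexdigitsA, Bool.eq_iff_iff]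
  simp only [List.contains_cons, List.contains_nil, Bool.or_false, Bool.or_eq_true,
    beq_iff_eq, char_eq_toNat, isHexClassB, Bool.and_eq_true, decide_eq_true_eq, char_le_toNat]
  simp only [Char.reduceToNat]
  omega

theorem join_cons (x : String) (l : List String) :
    String.join (x :: l) = x ++ String.join l := by
  suffices h : ∀ (l : List String) (s : String),
      List.foldl (fun r t => r ++ t) s l = s ++ String.join l by
    rw [String.join, List.foldl, h, String.empty_append]
  intro l
  induction l with
  | nil => intro s; exact (String.append_empty).symm
  | cons a l ih =>
      intro s
      rw [List.foldl, ih]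
      conv_rhs => rw [String.join, List.foldl, ih]
      rw [String.empty_append, String.append_assoc]

theorem replB_three (c1 c2 : Char) : replB ['%', c1, c2] = "%25" ++ String.ofList [c1, c2] := by
  simp [replB]

theorem replB_one (c : Char) : replB [c] = "%25" ++ pyHex2 c := by
  simp [replB]

theorem loop_eq (cs : List Char) :
    aLoop cs = String.join ((tokensB cs).map replB) := by
  fun_induction aLoop cs with
  | case1 => rfl
  | case2 c1 c2 rest h ih =>
      rw [tokensB]
      rw [hex_test_eq, hex_test_eq] at h
      rw [if_pos h, List.map_cons, join_cons, replB_three, ih, String.append_assoc]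
  | case3 c1 c2 rest h ih =>
      rw [tokensB]
      rw [hex_test_eq, hex_test_eq] at h
      rw [if_neg h, List.map_cons, join_cons, replB_one, ih, String.append_assoc]
  | case4 c rest h1 ih =>
      rw [tokensB]
      · rw [List.map_cons, join_cons, replB_one, ih, String.append_assoc]
      · exact h1

-- ===== VERDICT (by name: the statement is the Claim_ definition above) =====
theorem general_chardoubleencode_spec : Claim_equal_general_chardoubleencode := by
  intro payload _
  unfold Spec_general_chardoubleencode general_chardoubleencode general_chardoubleencode_alt
  split
  · rfl
  · exact loop_eq payload.toList
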